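-- pv_equiv track=rewrite | github.com/Method68/Rubiks | resolveThirdStep.py | valueCross
-- ===== SOURCE A (Python) =====
-- def valueCross(finalRubiks):
-- 	i = 0
-- 	valuecross = []
-- 	for elem in finalRubiks:
-- 		if elem == 'up':
-- 			for row in finalRubiks[elem]:
-- 				j = 0
-- 				for value in row:
-- 					if i == 0 or i == 2:
-- 						if j == 1:
-- 							valuecross.append(value)
-- 					if i == 1:
-- 						valuecross.append(value)
-- 					j += 1
-- 				i += 1
-- 	valuecross.sort()
-- 	return valuecross
-- ===== SOURCE B (Python) =====
-- def valueCross(finalRubiks):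
--     up = finalRubiks.get('up', [])[:3]
--     cross = []
--     if len(up) > 0 and len(up[0]) > 1:
--         cross.append(up[0][1])
--     if len(up) > 1:
--         cross.extend(up[1])
--     if len(up) > 2 and len(up[2]) > 1:
--         cross.append(up[2][1])
--     cross.sort()
--     return cross
-- ===== Notes on version B (the rewrite author's own statement) =====
-- stated objective: simpler
-- what changed: Replaces the triple-nested loop with i/j coordinate counters by three guarded direct reads of the cross cells of the first three rows of the looked-up up face, then one sort; Pre_ only excludes assoc lists with a duplicate 'up' key, which a Python dict cannot represent.
import Mathlib
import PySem

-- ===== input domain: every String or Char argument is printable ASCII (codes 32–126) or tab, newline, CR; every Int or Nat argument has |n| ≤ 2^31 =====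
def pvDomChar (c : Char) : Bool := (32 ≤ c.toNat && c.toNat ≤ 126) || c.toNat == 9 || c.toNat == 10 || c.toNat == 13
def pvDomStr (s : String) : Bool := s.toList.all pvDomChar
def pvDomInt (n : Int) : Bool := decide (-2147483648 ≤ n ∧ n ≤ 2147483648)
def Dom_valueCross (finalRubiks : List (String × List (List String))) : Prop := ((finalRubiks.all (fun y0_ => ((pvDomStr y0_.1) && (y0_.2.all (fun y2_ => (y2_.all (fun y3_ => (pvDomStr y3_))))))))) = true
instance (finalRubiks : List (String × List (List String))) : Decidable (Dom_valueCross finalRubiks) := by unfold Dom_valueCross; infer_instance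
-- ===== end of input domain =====

-- B is simpler: it reads the cross cells of the 'up' face by direct (guarded) indexing and one
-- sort, instead of A's triple-nested loop with i/j coordinate counters.

-- ===== PORT A =====
-- A's innermost loop body: state (j, (i, valuecross)); appends per the i/j guards.
def stepAValue (q : Int × (Int × List String)) (value : String) : Int × (Int × List String) :=
  let acc := if q.2.1 == 0 || q.2.1 == 2 then (if q.1 == 1 then q.2.2 ++ [value] else q.2.2) else q.2.2
  let acc := if q.2.1 == 1 then acc ++ [value] else acc
  (q.1 + 1, (q.2.1, acc))

-- A's middle loop body: j = 0; loop over the row; i += 1.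
def stepARow (st : Int × List String) (row : List String) : Int × List String :=
  let q := row.foldl stepAValue (0, st)
  (q.2.1 + 1, q.2.2)

-- A's outer loop body over the dict's keys (first-match lookup finalRubiks[elem], closed over fr).
def stepA (fr : List (String × List (List String))) (st : Int × List String)
    (elem : String × List (List String)) : Int × List String :=
  if elem.1 == "up" then ((List.lookup elem.1 fr).getD []).foldl stepARow st else st

def valueCross (finalRubiks : List (String × List (List String))) : List String :=
  let st := finalRubiks.foldl (stepA finalRubiks) (0, [])
  PySem.List.sorted st.2 (fun x => x) false

-- ===== PORT B =====
-- finalRubiks.get('up', [])[:3]; three guarded direct reads; cross.sort()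
def valueCross_alt (finalRubiks : List (String × List (List String))) : List String :=
  let up := PySem.List.slice ((List.lookup "up" finalRubiks).getD []) none (some 3)
  let cross : List String := []
  let cross := if 0 < up.length && 1 < ((PySem.List.pyGet? up 0).getD []).length
               then cross ++ [(PySem.List.pyGet? ((PySem.List.pyGet? up 0).getD []) 1).getD ""] else cross
  let cross := if 1 < up.length then cross ++ (PySem.List.pyGet? up 1).getD [] else cross
  let cross := if 2 < up.length && 1 < ((PySem.List.pyGet? up 2).getD []).length
               then cross ++ [(PySem.List.pyGet? ((PySem.List.pyGet? up 2).getD []) 1).getD ""] else cross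
  PySem.List.sorted cross (fun x => x) false

-- ===== PRECONDITION & SPEC =====
-- Pre_ only excludes association lists carrying the key "up" more than once — a Python dict
-- cannot hold duplicate keys, so A's behaviour there (re-walking the first 'up' face with the
-- row counter i carried over) is an artefact of the assoc-list representation.
def Pre_valueCross (finalRubiks : List (String × List (List String))) : Prop :=
  finalRubiks.countP (fun p => p.1 == "up") ≤ 1
instance (finalRubiks : List (String × List (List String))) : Decidable (Pre_valueCross finalRubiks) := by
  unfold Pre_valueCross; infer_instance
def pvWitness_valueCross : (List (String × List (List String))) :=
  [("up", [["w","b","r"],["g","y","o"],["b","w","g"]]), ("down", [["x"]])]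

def Spec_valueCross (finalRubiks : List (String × List (List String))) (out : List String) : Prop := out = valueCross_alt finalRubiks
instance (finalRubiks : List (String × List (List String))) (out : List String) : Decidable (Spec_valueCross finalRubiks out) := by unfold Spec_valueCross; infer_instance

-- ===== CLAIM (what is proved, stated in full; the proofs are below) =====
def Claim_equal_valueCross : Prop := ∀ (finalRubiks : List (String × List (List String))), Dom_valueCross finalRubiks → Pre_valueCross finalRubiks → Spec_valueCross finalRubiks (valueCross finalRubiks)

-- ===== LEMMAS AND PROOFS =====

-- the middle cell of a row, as A's i∈{0,2} pass collects it
def cMid (r : List String) : List String :=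
  if 1 < r.length then [(PySem.List.pyGet? r 1).getD ""] else []

-- what A collects from a face (rows beyond the third contribute nothing)
def crossOf (up : List (List String)) : List String :=
  match up with
  | [] => []
  | [r0] => cMid r0
  | [r0, r1] => cMid r0 ++ r1
  | r0 :: r1 :: r2 :: _ => cMid r0 ++ r1 ++ cMid r2

theorem foldl_value_one (row : List String) (j : Int) (acc : List String) :
    row.foldl stepAValue (j, (1, acc)) = (j + row.length, (1, acc ++ row)) := by
  induction row generalizing j acc with
  | nil => simp
  | cons v t ih =>
    simp only [List.foldl_cons, stepAValue]
    norm_num [ih]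
    omega

theorem foldl_value_noapp (row : List String) (i j : Int) (acc : List String)
    (h02 : ((i == 0) || (i == 2)) = false) (h1 : (i == 1) = false) :
    row.foldl stepAValue (j, (i, acc)) = (j + row.length, (i, acc)) := by
  induction row generalizing j with
  | nil => simp
  | cons v t ih =>
    simp only [List.foldl_cons, stepAValue, h02, h1]
    simp only [if_false, Bool.false_eq_true]
    rw [ih]
    simp only [List.length_cons, Prod.mk.injEq]
    norm_num
    all_goals omega

theorem foldl_value_late (row : List String) (i j : Int) (acc : List String)
    (hj : 2 ≤ j) (h1 : (i == 1) = false) :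
    row.foldl stepAValue (j, (i, acc)) = (j + row.length, (i, acc)) := by
  induction row generalizing j with
  | nil => simp
  | cons v t ih =>
    have hj1 : (j == 1) = false := beq_eq_false_iff_ne.mpr (by omega)
    simp only [List.foldl_cons, stepAValue, hj1, h1]
    simp only [if_false, Bool.false_eq_true, ite_self]
    rw [ih (j + 1) (by omega)]
    simp only [List.length_cons, Prod.mk.injEq]
    norm_num
    all_goals omega

theorem foldl_value_02 (row : List String) (i : Int) (acc : List String)
    (h02 : ((i == 0) || (i == 2)) = true) (h1 : (i == 1) = false) :
    row.foldl stepAValue (0, (i, acc)) = ((row.length : Int), (i, acc ++ cMid row)) := by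
  match row with
  | [] => simp [cMid]
  | [v] =>
    simp only [List.foldl_cons, List.foldl_nil, stepAValue, h02, h1]
    norm_num [cMid]
  | v0 :: v1 :: t =>
    simp only [List.foldl_cons, stepAValue, h02, h1]
    norm_num
    rw [foldl_value_late t i 2 (acc ++ [v1]) (by omega) h1]
    refine Prod.ext ?_ (Prod.ext rfl ?_)
    · simp; omega
    · simp [cMid, PySem.List.pyGet?, PySem.List.pyIdx?]

theorem foldl_row_late (rows : List (List String)) (i : Int) (acc : List String) (hi : 3 ≤ i) :
    rows.foldl stepARow (i, acc) = (i + rows.length, acc) := by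
  induction rows generalizing i with
  | nil => simp
  | cons r t ih =>
    simp only [List.foldl_cons, stepARow]
    rw [foldl_value_noapp r i 0 acc
      (by simp only [Bool.or_eq_false_iff]
          exact ⟨beq_eq_false_iff_ne.mpr (by omega), beq_eq_false_iff_ne.mpr (by omega)⟩)
      (beq_eq_false_iff_ne.mpr (by omega))]
    simp only []
    rw [ih (i + 1) (by omega)]
    simp only [List.length_cons, Prod.mk.injEq]
    norm_num
    all_goals omega

theorem face_fold (up : List (List String)) :
    up.foldl stepARow (0, []) = ((up.length : Int), crossOf up) := by
  match up with
  | [] => simp [crossOf]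
  | [r0] =>
    have h0 := foldl_value_02 r0 0 [] (by decide) (by decide)
    simp only [List.foldl_cons, List.foldl_nil, stepARow, h0, List.nil_append]
    norm_num [crossOf]
  | [r0, r1] =>
    have h0 := foldl_value_02 r0 0 [] (by decide) (by decide)
    have h1 := foldl_value_one r1 0 (cMid r0)
    simp only [List.foldl_cons, List.foldl_nil, stepARow, h0, List.nil_append, zero_add]
    norm_num [h1, crossOf]
  | r0 :: r1 :: r2 :: rest =>
    have h0 := foldl_value_02 r0 0 [] (by decide) (by decide)
    have h1 := foldl_value_one r1 0 (cMid r0)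
    have h2 := foldl_value_02 r2 2 (cMid r0 ++ r1) (by decide) (by decide)
    have hrest := foldl_row_late rest 3 (cMid r0 ++ (r1 ++ cMid r2)) (by omega)
    simp only [List.foldl_cons, stepARow, h0, List.nil_append, zero_add]
    norm_num [h1, h2, hrest, crossOf, List.append_assoc]
    omega

-- entries whose key is not "up" leave A's outer fold state unchanged
theorem foldl_stepA_skip (fr : List (String × List (List String)))
    (l : List (String × List (List String))) (st : Int × List String)
    (h : ∀ p ∈ l, (p.1 == "up") = false) :
    l.foldl (stepA fr) st = st := by
  induction l generalizing st with
  | nil => rfl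
  | cons p t ih =>
    simp only [List.foldl_cons]
    rw [show stepA fr st p = st by simp [stepA, h p (by simp)]]
    exact ih st (fun q hq => h q (by simp [hq]))

-- a failed first-match lookup means no entry carries the key
theorem lookup_none_no_key (fr : List (String × List (List String)))
    (h : List.lookup "up" fr = none) : ∀ p ∈ fr, (p.1 == "up") = false := by
  induction fr with
  | nil => simp
  | cons p t ih =>
    obtain ⟨k, v⟩ := p
    have hbk : ("up" == k) = false := by
      by_cases hk : "up" = k
      · subst hk; simp [List.lookup] at h
      · exact beq_eq_false_iff_ne.mpr hk
    have h' : List.lookup "up" t = none := by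
      simp only [List.lookup, hbk] at h; exact h
    intro q hq
    rcases List.mem_cons.mp hq with rfl | hq'
    · exact beq_eq_false_iff_ne.mpr (fun hx => (beq_eq_false_iff_ne.mp hbk) hx.symm)
    · exact ih h' q hq'

-- a successful first-match lookup splits the list around the (first) matching entry
theorem lookup_split (fr : List (String × List (List String))) (up : List (List String))
    (h : List.lookup "up" fr = some up) :
    ∃ l1 l2, fr = l1 ++ ("up", up) :: l2 ∧ ∀ p ∈ l1, (p.1 == "up") = false := by
  induction fr with
  | nil => simp [List.lookup] at h
  | cons p t ih =>
    obtain ⟨k, v⟩ := p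
    by_cases hk : "up" = k
    · subst hk
      refine ⟨[], t, ?_, by simp⟩
      simp [List.lookup] at h
      simp [h]
    · have hbk : ("up" == k) = false := beq_eq_false_iff_ne.mpr hk
      have h' : List.lookup "up" t = some up := by
        simp only [List.lookup, hbk] at h; exact h
      obtain ⟨l1, l2, hfr, hl1⟩ := ih h'
      refine ⟨(k, v) :: l1, l2, by simp [hfr], ?_⟩
      intro q hq
      rcases List.mem_cons.mp hq with rfl | hq'
      · exact beq_eq_false_iff_ne.mpr (fun hx => (beq_eq_false_iff_ne.mp hbk) hx.symm)
      · exact hl1 q hq'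

-- B's guarded direct reads compute exactly what A's loops collect from the face
theorem alt_cross_eq (up : List (List String)) :
    (let u := PySem.List.slice up none (some 3)
     let cross : List String := []
     let cross := if 0 < u.length && 1 < ((PySem.List.pyGet? u 0).getD []).length
                  then cross ++ [(PySem.List.pyGet? ((PySem.List.pyGet? u 0).getD []) 1).getD ""] else cross
     let cross := if 1 < u.length then cross ++ (PySem.List.pyGet? u 1).getD [] else cross
     let cross := if 2 < u.length && 1 < ((PySem.List.pyGet? u 2).getD []).length
                  then cross ++ [(PySem.List.pyGet? ((PySem.List.pyGet? u 2).getD []) 1).getD ""] else cross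
     cross) = crossOf up := by
  have hs : PySem.List.slice up none (some 3) = up.take 3 := by
    rw [show (3 : Int) = ((3 : Nat) : Int) from rfl, PySem.List.slice_to_natCast]
  match up with
  | [] => simp [hs, crossOf]
  | [r0] =>
    simp only [hs]
    by_cases h0 : 1 < r0.length <;>
      simp [crossOf, cMid, h0, PySem.List.pyGet?, PySem.List.pyIdx?]
  | [r0, r1] =>
    simp only [hs]
    by_cases h0 : 1 < r0.length <;>
      simp [crossOf, cMid, h0, PySem.List.pyGet?, PySem.List.pyIdx?]
  | r0 :: r1 :: r2 :: rest =>
    simp only [hs]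
    by_cases h0 : 1 < r0.length <;> by_cases h2 : 1 < r2.length <;>
      simp [crossOf, cMid, h0, h2, PySem.List.pyGet?, PySem.List.pyIdx?]

-- ===== VERDICT (by name: the statement is the Claim_ definition above) =====
theorem valueCross_spec : Claim_equal_valueCross := by
  unfold Claim_equal_valueCross
  intro fr _ hcount
  unfold Pre_valueCross at hcount
  unfold Spec_valueCross valueCross valueCross_alt
  cases hlk : List.lookup "up" fr with
  | none =>
    rw [foldl_stepA_skip fr fr _ (lookup_none_no_key fr hlk)]
    simp [PySem.List.slice]
  | some up =>
    obtain ⟨l1, l2, hfr, hl1⟩ := lookup_split fr _ hlk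
    subst hfr
    have hl2 : ∀ p ∈ l2, (p.1 == "up") = false := by
      simp only [List.countP_append, List.countP_cons] at hcount
      have h0 : l2.countP (fun p => p.1 == "up") = 0 := by
        simp only [beq_self_eq_true, if_pos] at hcount; omega
      intro p hp
      simpa using List.countP_eq_zero.mp h0 p hp
    rw [List.foldl_append, foldl_stepA_skip _ l1 _ hl1, List.foldl_cons]
    rw [show stepA (l1 ++ ("up", up) :: l2) (0, []) ("up", up) = ((up.length : Int), crossOf up) by
          simp only [stepA, beq_self_eq_true, if_pos, hlk, Option.getD_some]
          exact face_fold up]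
    rw [foldl_stepA_skip _ l2 _ hl2]
    simp only [Option.getD_some]
    exact congrArg (fun l => PySem.List.sorted l (fun x => x) false) (alt_cross_eq up).symm
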